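-- pv_equiv track=rewrite | github.com/Abhikarki/CS50 | pset 6/DNA/dna.py | find_num_of_occurrence
-- ===== SOURCE A (Python) =====
-- def find_num_of_occurrence(seq, s):
--     tmp_num, i, num = 0, 0, 0
--     #length of the STR passed as argument.
--     length = len(s)
--
--     #find() returns the index of the first occurrrence of substring
--     #find() returns -1 if substring doesn't exist inside the string.
--     while seq.find(s, i, len(seq)) != -1:
--         a = seq.find(s, i, len(seq))
--         if i == 0 or a == i:
--             tmp_num += 1
--             if tmp_num > num:
--                 num = tmp_num
--             i = a + length
--         else:
--             i = a + length
--             tmp_num = 1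
--     return num
-- ===== SOURCE B (Python) =====
-- import re
--
-- def find_num_of_occurrence(seq, s):
--     # delegate maximal-run detection to the regex engine: '(?:s)+' matches
--     # maximal stretches of back-to-back copies of s, left to right.
--     matches = re.findall('(?:' + re.escape(s) + ')+', seq)
--     return max((len(m) // len(s) for m in matches), default=0)
-- ===== Notes on version B (the rewrite author's own statement) =====
-- stated objective: idiomatic
-- what changed: Replaced the manual find/position-comparison loop with run-counter bookkeeping by a regex one-liner: '(?:escaped_s)+' makes re.findall return the maximal stretches of back-to-back copies of s, and the answer is the max match length divided by len(s) (default 0).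
import Mathlib
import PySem

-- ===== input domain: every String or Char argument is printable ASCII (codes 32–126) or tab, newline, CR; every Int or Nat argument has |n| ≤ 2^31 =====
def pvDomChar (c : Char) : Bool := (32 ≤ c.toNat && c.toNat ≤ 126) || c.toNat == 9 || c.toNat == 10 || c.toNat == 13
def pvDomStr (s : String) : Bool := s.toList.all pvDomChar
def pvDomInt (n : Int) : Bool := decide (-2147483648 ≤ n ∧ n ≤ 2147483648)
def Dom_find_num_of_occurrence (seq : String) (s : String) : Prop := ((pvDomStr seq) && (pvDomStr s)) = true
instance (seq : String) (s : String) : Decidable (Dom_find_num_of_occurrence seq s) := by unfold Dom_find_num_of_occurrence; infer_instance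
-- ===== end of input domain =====

-- B replaces A's manual find/position-comparison loop by the regex one-liner
-- re.findall('(?:escaped_s)+', seq) and takes the max match length // len(s) (idiomatic; same cost).
-- A never returns on s = "" (its while loop does not advance), hence Pre_ excludes s = "".

-- ===== PORT A =====
-- literal port of A's while loop; fuel bounds the iteration count (each iteration
-- advances i by at least 1 when s ≠ "", so seq.length + 2 iterations always suffice;
-- the fuel-exhausted branch is unreachable under Pre_).
def pvLoopA (seq s : String) : Nat → Int → Int → Int → Int
  | 0, _, _, num => num
  | fuel+1, tmp_num, i, num =>
    let f := PySem.Str.findFrom seq s i (some (PySem.Str.len seq))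
    if f = -1 then num
    else
      let a := f
      if i = 0 ∨ a = i then
        let tmp' := tmp_num + 1
        let num' := if tmp' > num then tmp' else num
        pvLoopA seq s fuel tmp' (a + PySem.Str.len s) num'
      else
        pvLoopA seq s fuel 1 (a + PySem.Str.len s) num

def find_num_of_occurrence (seq : String) (s : String) : Int :=
  pvLoopA seq s (seq.length + 2) 0 0 0

-- ===== PORT B =====
-- hand port of re.findall('(?:' + re.escape(s) + ')+', seq) for a literal s:
-- exact for this pattern (nothing follows the '+', so no backtracking): scan left to
-- right; at the leftmost occurrence a of s take the maximal k ≥ 1 back-to-back copies,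
-- emit seq[a : a + k*len(s)], resume at the match end.  Fueled like Port A.
def pvReps (seq s : String) : Nat → Int → Int
  | 0, _ => 0
  | fuel+1, pos =>
    if PySem.Str.slice seq (some pos) (some (pos + PySem.Str.len s)) = s then
      pvReps seq s fuel (pos + PySem.Str.len s) + 1
    else 0

def pvFindall (seq s : String) : Nat → Int → List String
  | 0, _ => []
  | fuel+1, pos =>
    let f := PySem.Str.findFrom seq s pos none
    if f = -1 then []
    else
      let k := pvReps seq s (seq.length + 1) (f + PySem.Str.len s) + 1
      let e := f + k * PySem.Str.len s
      PySem.Str.slice seq (some f) (some e) :: pvFindall seq s fuel e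

def find_num_of_occurrence_alt (seq : String) (s : String) : Int :=
  let ms := pvFindall seq s (seq.length + 1) 0
  match PySem.List.max? (ms.map (fun m => PySem.Int.floordiv (PySem.Str.len m) (PySem.Str.len s))) (fun v => v) with
  | none => 0
  | some v => v

-- ===== PRECONDITION & SPEC =====
-- Pre_ excludes only s = "", where A's while loop never advances i and A diverges
-- (and B raises ZeroDivisionError).
def Pre_find_num_of_occurrence (seq : String) (s : String) : Prop := s ≠ ""
instance (seq : String) (s : String) : Decidable (Pre_find_num_of_occurrence seq s) := by
  unfold Pre_find_num_of_occurrence; infer_instance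

def pvWitness_find_num_of_occurrence : String × String := ("ACGTACGTAC", "ACGT")

def Spec_find_num_of_occurrence (seq : String) (s : String) (out : Int) : Prop := out = find_num_of_occurrence_alt seq s
instance (seq : String) (s : String) (out : Int) : Decidable (Spec_find_num_of_occurrence seq s out) := by unfold Spec_find_num_of_occurrence; infer_instance

-- ===== CLAIM (what is proved, stated in full; the proofs are below) =====
def Claim_equal_find_num_of_occurrence : Prop := ∀ (seq : String) (s : String), Dom_find_num_of_occurrence seq s → Pre_find_num_of_occurrence seq s → Spec_find_num_of_occurrence seq s (find_num_of_occurrence seq s)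

-- ===== LEMMAS AND PROOFS =====

-- Nat-world mirrors of both loops, over the character lists (cs = seq.toList, p = s.toList).

/-- index of the first occurrence of `p` at position ≥ j, via PySem's find. -/
def pvFindo (cs p : List Char) (j : Nat) : Option Nat :=
  if PySem.Chars.find (cs.drop j) p = -1 then none
  else some (j + (PySem.Chars.find (cs.drop j) p).toNat)

/-- number of back-to-back copies of p starting at j. -/
def pvRc (cs p : List Char) : Nat → Nat → Nat
  | 0, _ => 0
  | f+1, j => if p <+: cs.drop j then pvRc cs p f (j + p.length) + 1 else 0

/-- rc with ample fuel. -/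
def pvRc' (cs p : List Char) (j : Nat) : Nat := pvRc cs p (cs.length + 1) j

/-- the list of run lengths, scanning greedily from j. -/
def pvRuns (cs p : List Char) : Nat → Nat → List Nat
  | 0, _ => []
  | f+1, j =>
    match pvFindo cs p j with
    | none => []
    | some a => pvRc' cs p a :: pvRuns cs p f (a + pvRc' cs p a * p.length)

/-- max run length from j (B's value). -/
def pvM (cs p : List Char) (f j : Nat) : Nat := (pvRuns cs p f j).foldr max 0

/-- Nat mirror of A's loop. -/
def pvLoopN (cs p : List Char) : Nat → Nat → Nat → Nat → Nat
  | 0, _, _, num => num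
  | f+1, tmp, j, num =>
    match pvFindo cs p j with
    | none => num
    | some a =>
      if j = 0 ∨ a = j then pvLoopN cs p f (tmp+1) (a + p.length) (max num (tmp+1))
      else pvLoopN cs p f 1 (a + p.length) num

theorem pvRc_succ (cs p : List Char) (f j : Nat) :
    pvRc cs p (f+1) j = if p <+: cs.drop j then pvRc cs p f (j + p.length) + 1 else 0 := rfl

theorem pvRuns_succ (cs p : List Char) (f j : Nat) :
    pvRuns cs p (f+1) j =
      match pvFindo cs p j with
      | none => []
      | some a => pvRc' cs p a :: pvRuns cs p f (a + pvRc' cs p a * p.length) := rfl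

theorem pvLoopN_succ (cs p : List Char) (f tmp j num : Nat) :
    pvLoopN cs p (f+1) tmp j num =
      match pvFindo cs p j with
      | none => num
      | some a =>
        if j = 0 ∨ a = j then pvLoopN cs p f (tmp+1) (a + p.length) (max num (tmp+1))
        else pvLoopN cs p f 1 (a + p.length) num := rfl

-- basic facts ---------------------------------------------------------------

theorem pvOcc_le (cs p : List Char) (hp : p ≠ []) (j : Nat) (h : p <+: cs.drop j) :
    j + p.length ≤ cs.length := by
  have h1 : p.length ≤ (cs.drop j).length := h.length_le
  have h2 : (cs.drop j).length = cs.length - j := List.length_drop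
  have h3 : 1 ≤ p.length := List.length_pos_iff.mpr hp
  omega

theorem pvFindo_some (cs p : List Char) (j a : Nat) (h : pvFindo cs p j = some a) :
    j ≤ a ∧ p <+: cs.drop a := by
  unfold pvFindo at h
  split at h
  · exact absurd h (by simp)
  · rename_i hr
    have h0 : 0 ≤ PySem.Chars.find (cs.drop j) p := by
      have := PySem.Chars.neg_one_le_find (cs.drop j) p
      omega
    obtain ⟨hpre, -⟩ := PySem.Chars.find_spec h0
    rw [List.drop_drop] at hpre
    have ha : a = j + (PySem.Chars.find (cs.drop j) p).toNat := by
      injection h with h'; omega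
    constructor
    · omega
    · rw [ha]; exact hpre

theorem pvFindo_occ (cs p : List Char) (j : Nat) (h : p <+: cs.drop j) :
    pvFindo cs p j = some j := by
  have h0 : 0 ≤ PySem.Chars.find (cs.drop j) p :=
    (PySem.Chars.find_nonneg_iff _ _).mpr h.isInfix
  obtain ⟨-, hmin⟩ := PySem.Chars.find_spec h0
  have hz : (PySem.Chars.find (cs.drop j) p).toNat = 0 := by
    by_contra hnz
    exact hmin 0 (by omega) (by simpa using h)
  unfold pvFindo
  split
  · rename_i hr; omega
  · rename_i hr; simp [hz]

theorem pvRc_fuel (cs p : List Char) (hp : p ≠ []) :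
    ∀ f j, cs.length + 1 ≤ j + f → pvRc cs p (f+1) j = pvRc cs p f j := by
  intro f
  induction f with
  | zero =>
    intro j hj
    rw [pvRc_succ]
    split
    · rename_i h; have := pvOcc_le cs p hp j h; omega
    · rfl
  | succ f ih =>
    intro j hj
    have hL : 1 ≤ p.length := List.length_pos_iff.mpr hp
    rw [pvRc_succ cs p (f+1) j, pvRc_succ cs p f j]
    by_cases h : p <+: cs.drop j
    · rw [if_pos h, if_pos h, ih (j + p.length) (by omega)]
    · rw [if_neg h, if_neg h]

theorem pvRc'_occ (cs p : List Char) (hp : p ≠ []) (j : Nat) (h : p <+: cs.drop j) :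
    pvRc' cs p j = pvRc' cs p (j + p.length) + 1 := by
  have hL : 1 ≤ p.length := List.length_pos_iff.mpr hp
  unfold pvRc'
  rw [pvRc_succ, if_pos h]
  rw [show pvRc cs p cs.length (j + p.length)
      = pvRc cs p (cs.length + 1) (j + p.length) from
    (pvRc_fuel cs p hp cs.length (j + p.length) (by omega)).symm]

theorem pvRc'_nocc (cs p : List Char) (j : Nat) (h : ¬ p <+: cs.drop j) :
    pvRc' cs p j = 0 := by
  unfold pvRc'
  rw [pvRc_succ, if_neg h]

theorem pvRc'_reach (cs p : List Char) (hp : p ≠ []) (j : Nat) (h : p <+: cs.drop j) :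
    j + pvRc' cs p j * p.length ≤ cs.length := by
  suffices H : ∀ f j, 1 ≤ pvRc cs p f j → j + pvRc cs p f j * p.length ≤ cs.length by
    apply H
    show 1 ≤ pvRc' cs p j
    rw [pvRc'_occ cs p hp j h]
    omega
  intro f
  induction f with
  | zero => intro j h1; simp [pvRc] at h1
  | succ f ih =>
    intro j h1
    rw [pvRc_succ] at h1 ⊢
    by_cases hocc : p <+: cs.drop j
    · rw [if_pos hocc] at h1 ⊢
      rcases Nat.eq_zero_or_pos (pvRc cs p f (j + p.length)) with hz | hpos
      · rw [hz]
        have := pvOcc_le cs p hp j hocc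
        simpa using this
      · have := ih (j + p.length) hpos
        rw [Nat.succ_mul]
        omega
    · rw [if_neg hocc] at h1
      omega

theorem pvRuns_fuel (cs p : List Char) (hp : p ≠ []) :
    ∀ f j, cs.length + 1 ≤ j + f → pvRuns cs p (f+1) j = pvRuns cs p f j := by
  intro f
  have hL : 1 ≤ p.length := List.length_pos_iff.mpr hp
  induction f with
  | zero =>
    intro j hj
    rw [pvRuns_succ]
    rcases hf : pvFindo cs p j with - | a
    · simp [pvRuns]
    · obtain ⟨hja, hocc⟩ := pvFindo_some cs p j a hf
      have := pvOcc_le cs p hp a hocc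
      omega
  | succ f ih =>
    intro j hj
    rw [pvRuns_succ cs p (f+1) j, pvRuns_succ cs p f j]
    rcases hf : pvFindo cs p j with - | a
    · simp
    · obtain ⟨hja, hocc⟩ := pvFindo_some cs p j a hf
      have hrc : 1 ≤ pvRc' cs p a := by rw [pvRc'_occ cs p hp a hocc]; omega
      have hm : p.length ≤ pvRc' cs p a * p.length := Nat.le_mul_of_pos_left _ hrc
      simp only
      rw [ih (a + pvRc' cs p a * p.length) (by omega)]

-- A's loop: the num accumulator factors out --------------------------------

theorem pvLoopN_num (cs p : List Char) :
    ∀ f tmp j num, pvLoopN cs p f tmp j num = max num (pvLoopN cs p f tmp j 0) := by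
  intro f
  induction f with
  | zero => intro tmp j num; simp [pvLoopN]
  | succ f ih =>
    intro tmp j num
    rw [pvLoopN_succ cs p f tmp j num, pvLoopN_succ cs p f tmp j 0]
    rcases hf : pvFindo cs p j with - | a
    · simp
    · simp only
      split
      · rw [ih (tmp+1) (a + p.length) (max num (tmp+1)),
            ih (tmp+1) (a + p.length) (max 0 (tmp+1))]
        simp [Nat.max_assoc]
      · rw [ih 1 (a + p.length) num]

-- main invariant ------------------------------------------------------------

theorem pvMain (cs p : List Char) (hp : p ≠ []) :
    ∀ f j tmp, cs.length + 1 ≤ j + f → 1 ≤ j → j ≤ cs.length →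
      ((p <+: cs.drop j) →
        pvLoopN cs p f tmp j 0 =
          max (tmp + pvRc' cs p j) (pvM cs p (cs.length + 1) (j + pvRc' cs p j * p.length))) ∧
      (¬ (p <+: cs.drop j) →
        pvLoopN cs p f tmp j 0 ≤ pvM cs p (cs.length + 1) j ∧
        pvM cs p (cs.length + 1) j ≤ max 1 (pvLoopN cs p f tmp j 0)) := by
  have hL : 1 ≤ p.length := List.length_pos_iff.mpr hp
  intro f
  induction f with
  | zero => intro j tmp hfu h1 hjn; exact absurd hfu (by omega)
  | succ f ih =>
    intro j tmp hfu h1 hjn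
    constructor
    · -- occ j: a full chain
      intro hocc
      have hfo := pvFindo_occ cs p j hocc
      have hjL : j + p.length ≤ cs.length := pvOcc_le cs p hp j hocc
      rw [pvLoopN_succ, hfo]
      show (if j = 0 ∨ j = j then _ else _) = _
      rw [if_pos (show j = 0 ∨ j = j from Or.inr rfl)]
      rw [pvLoopN_num cs p f (tmp+1) (j + p.length) (max 0 (tmp+1))]
      by_cases hocc2 : p <+: cs.drop (j + p.length)
      · have hG := (ih (j + p.length) (tmp+1) (by omega) (by omega) hjL).1 hocc2
        rw [hG]
        have hrc := pvRc'_occ cs p hp j hocc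
        have hidx : j + pvRc' cs p j * p.length
            = (j + p.length) + pvRc' cs p (j + p.length) * p.length := by
          rw [hrc, Nat.succ_mul]; ring
        rw [hidx, hrc]
        omega
      · have hrc : pvRc' cs p j = 1 := by
          rw [pvRc'_occ cs p hp j hocc, pvRc'_nocc cs p _ hocc2]
        obtain ⟨hle, hge⟩ := (ih (j + p.length) (tmp+1) (by omega) (by omega) hjL).2 hocc2
        rw [hrc]
        have hidx : j + 1 * p.length = j + p.length := by ring
        rw [hidx]
        omega
    · -- ¬ occ j
      intro hnocc
      rcases hfo : pvFindo cs p j with - | a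
      · rw [pvLoopN_succ, hfo]
        simp only
        have hruns : pvRuns cs p (cs.length + 1) j = [] := by
          rw [pvRuns_succ cs p cs.length j, hfo]
        unfold pvM
        rw [hruns]
        simp
      · obtain ⟨hja, hocca⟩ := pvFindo_some cs p j a hfo
        have haL : a + p.length ≤ cs.length := pvOcc_le cs p hp a hocca
        have hne : a ≠ j := fun e => hnocc (e ▸ hocca)
        have hrc1 : 1 ≤ pvRc' cs p a := by rw [pvRc'_occ cs p hp a hocca]; omega
        rw [pvLoopN_succ, hfo]
        have hcond : ¬ (j = 0 ∨ a = j) := not_or.mpr ⟨by omega, hne⟩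
        show (if j = 0 ∨ a = j then pvLoopN cs p f (tmp + 1) (a + p.length) (max 0 (tmp + 1))
              else pvLoopN cs p f 1 (a + p.length) 0) ≤ _ ∧
          _ ≤ max 1 (if j = 0 ∨ a = j then pvLoopN cs p f (tmp + 1) (a + p.length) (max 0 (tmp + 1))
              else pvLoopN cs p f 1 (a + p.length) 0)
        rw [if_neg hcond]
        have hMj : pvM cs p (cs.length + 1) j
            = max (pvRc' cs p a) (pvM cs p (cs.length + 1) (a + pvRc' cs p a * p.length)) := by
          unfold pvM
          rw [pvRuns_succ cs p cs.length j, hfo]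
          simp only [List.foldr]
          congr 2
          refine (pvRuns_fuel cs p hp cs.length (a + pvRc' cs p a * p.length) ?_).symm
          have : p.length ≤ pvRc' cs p a * p.length := Nat.le_mul_of_pos_left _ hrc1
          omega
        rw [hMj]
        by_cases hocc2 : p <+: cs.drop (a + p.length)
        · have hG := (ih (a + p.length) 1 (by omega) (by omega) haL).1 hocc2
          rw [hG]
          have hrc := pvRc'_occ cs p hp a hocca
          have hidx : a + pvRc' cs p a * p.length
              = (a + p.length) + pvRc' cs p (a + p.length) * p.length := by
            rw [hrc, Nat.succ_mul]; ring
          rw [hidx, hrc]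
          omega
        · have hrc : pvRc' cs p a = 1 := by
            rw [pvRc'_occ cs p hp a hocca, pvRc'_nocc cs p _ hocc2]
          obtain ⟨hle, hge⟩ := (ih (a + p.length) 1 (by omega) (by omega) haL).2 hocc2
          rw [hrc]
          have hidx : a + 1 * p.length = a + p.length := by ring
          rw [hidx]
          omega

theorem pvTop (cs p : List Char) (hp : p ≠ []) :
    pvLoopN cs p (cs.length + 2) 0 0 0 = pvM cs p (cs.length + 1) 0 := by
  have hL : 1 ≤ p.length := List.length_pos_iff.mpr hp
  rw [show cs.length + 2 = (cs.length + 1) + 1 from rfl, pvLoopN_succ]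
  rcases hfo : pvFindo cs p 0 with - | a
  · simp only
    unfold pvM
    rw [pvRuns_succ cs p cs.length 0, hfo]
    simp
  · obtain ⟨-, hocca⟩ := pvFindo_some cs p 0 a hfo
    have haL : a + p.length ≤ cs.length := pvOcc_le cs p hp a hocca
    have hrc1 : 1 ≤ pvRc' cs p a := by rw [pvRc'_occ cs p hp a hocca]; omega
    show (if 0 = 0 ∨ a = 0 then _ else _) = _
    rw [if_pos (show (0:Nat) = 0 ∨ a = 0 from Or.inl rfl)]
    rw [pvLoopN_num cs p (cs.length + 1) 1 (a + p.length) (max 0 1)]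
    have hM0 : pvM cs p (cs.length + 1) 0
        = max (pvRc' cs p a) (pvM cs p (cs.length + 1) (a + pvRc' cs p a * p.length)) := by
      unfold pvM
      rw [pvRuns_succ cs p cs.length 0, hfo]
      simp only [List.foldr]
      congr 2
      refine (pvRuns_fuel cs p hp cs.length (a + pvRc' cs p a * p.length) ?_).symm
      have : p.length ≤ pvRc' cs p a * p.length := Nat.le_mul_of_pos_left _ hrc1
      omega
    rw [hM0]
    by_cases hocc2 : p <+: cs.drop (a + p.length)
    · have hG := (pvMain cs p hp (cs.length + 1) (a + p.length) 1 (by omega) (by omega) haL).1 hocc2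
      rw [hG]
      have hrc := pvRc'_occ cs p hp a hocca
      have hidx : a + pvRc' cs p a * p.length
          = (a + p.length) + pvRc' cs p (a + p.length) * p.length := by
        rw [hrc, Nat.succ_mul]; ring
      rw [hidx, hrc]
      omega
    · have hrc : pvRc' cs p a = 1 := by
        rw [pvRc'_occ cs p hp a hocca, pvRc'_nocc cs p _ hocc2]
      obtain ⟨hle, hge⟩ := (pvMain cs p hp (cs.length + 1) (a + p.length) 1 (by omega) (by omega) haL).2 hocc2
      rw [hrc]
      have hidx : a + 1 * p.length = a + p.length := by ring
      rw [hidx]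
      omega

-- bridges to the Int-state ports --------------------------------------------

theorem pvFindFrom_eq (seq s : String) (j : Nat) (hj : j ≤ seq.length) :
    PySem.Str.findFrom seq s (j : Int) (some (PySem.Str.len seq)) =
      (match pvFindo seq.toList s.toList j with
       | none => (-1 : Int)
       | some a => (a : Int)) := by
  rw [PySem.Str.findFrom_eq]
  have hj' : j ≤ seq.toList.length := by rwa [String.length_toList]
  have h1 : PySem.Chars.findFrom seq.toList s.toList (j : Int) (some (PySem.Str.len seq))
      = PySem.Chars.findFrom seq.toList s.toList (j : Int) none := by
    show PySem.Chars.findFrom seq.toList s.toList (j : Int) (some (seq.toList.length : Int)) = _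
    have h0n : ¬((seq.length : Int) < 0) := by omega
    have h0j : ¬((j : Int) < 0) := by omega
    simp [PySem.Chars.findFrom, h0n, h0j]
  rw [h1, PySem.Chars.findFrom_natCast seq.toList s.toList j hj']
  unfold pvFindo
  by_cases hr : PySem.Chars.find (seq.toList.drop j) s.toList = -1
  · simp [hr]
  · have h0 : 0 ≤ PySem.Chars.find (seq.toList.drop j) s.toList := by
      have := PySem.Chars.neg_one_le_find (seq.toList.drop j) s.toList
      omega
    have hcast : ((j + (PySem.Chars.find (seq.toList.drop j) s.toList).toNat : Nat) : Int)
        = (j : Int) + PySem.Chars.find (seq.toList.drop j) s.toList := by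
      push_cast [Int.toNat_of_nonneg h0]; ring
    simp only [hr, if_false, hcast]

theorem pvFindFrom_none (seq s : String) (j : Nat) (hj : j ≤ seq.length)
    (h : pvFindo seq.toList s.toList j = none) :
    PySem.Str.findFrom seq s (j : Int) (some (PySem.Str.len seq)) = -1 := by
  rw [pvFindFrom_eq seq s j hj, h]

theorem pvFindFrom_some (seq s : String) (j a : Nat) (hj : j ≤ seq.length)
    (h : pvFindo seq.toList s.toList j = some a) :
    PySem.Str.findFrom seq s (j : Int) (some (PySem.Str.len seq)) = (a : Int) := by
  rw [pvFindFrom_eq seq s j hj, h]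

theorem pvLoopA_eq (seq s : String) (hp : s ≠ "") :
    ∀ f (t j m : Nat), j ≤ seq.length →
      pvLoopA seq s f (t : Int) (j : Int) (m : Int) =
        ((pvLoopN seq.toList s.toList f t j m : Nat) : Int) := by
  have hp' : s.toList ≠ [] := fun h => hp (String.toList_eq_nil_iff.mp h)
  have hL : 1 ≤ s.toList.length := List.length_pos_iff.mpr hp'
  intro f
  induction f with
  | zero => intro t j m _; rfl
  | succ f ih =>
    intro t j m hj
    simp only [pvLoopA]
    rcases hfo : pvFindo seq.toList s.toList j with - | a
    · rw [pvFindFrom_none seq s j hj hfo, pvLoopN_succ, hfo]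
      rw [if_pos rfl]
    · obtain ⟨hja, hocc⟩ := pvFindo_some _ _ _ _ hfo
      have haL : a + s.toList.length ≤ seq.toList.length := pvOcc_le _ _ hp' _ hocc
      have haL' : a + s.toList.length ≤ seq.length := by rwa [String.length_toList] at haL
      rw [pvFindFrom_some seq s j a hj hfo, pvLoopN_succ, hfo]
      rw [if_neg (show ¬((a:Int) = -1) by omega)]
      show _ = ((if j = 0 ∨ a = j
          then pvLoopN seq.toList s.toList f (t + 1) (a + s.toList.length) (max m (t + 1))
          else pvLoopN seq.toList s.toList f 1 (a + s.toList.length) m : Nat) : Int)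
      have elen : PySem.Str.len s = ((s.toList.length : Nat) : Int) := rfl
      have eidx : (a : Int) + PySem.Str.len s = ((a + s.toList.length : Nat) : Int) := by
        rw [elen]; push_cast; ring
      by_cases hbr : j = 0 ∨ a = j
      · have hbr' : (j : Int) = 0 ∨ (a : Int) = (j : Int) := by
          rcases hbr with h | h
          · exact Or.inl (by exact_mod_cast congrArg (Nat.cast : Nat → Int) h)
          · exact Or.inr (by exact_mod_cast congrArg (Nat.cast : Nat → Int) h)
        rw [if_pos hbr', if_pos hbr]
        have e1 : (t : Int) + 1 = ((t + 1 : Nat) : Int) := by push_cast; ring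
        have e2 : (if ((t + 1 : Nat) : Int) > (m : Int) then ((t + 1 : Nat) : Int) else (m : Int))
            = ((max m (t + 1) : Nat) : Int) := by
          split_ifs with h <;> omega
        rw [e1, e2, eidx]
        exact ih (t+1) (a + s.toList.length) (max m (t+1)) haL'
      · have hbr' : ¬((j : Int) = 0 ∨ (a : Int) = (j : Int)) := by
          rw [not_or] at hbr ⊢
          constructor
          · intro h; exact hbr.1 (by exact_mod_cast h)
          · intro h; exact hbr.2 (by exact_mod_cast h)
        rw [if_neg hbr', if_neg hbr, eidx]
        rw [show (1 : Int) = ((1 : Nat) : Int) from rfl]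
        exact ih 1 (a + s.toList.length) m haL'

theorem pvFindFrom0_eq (seq s : String) (j : Nat) (hj : j ≤ seq.length) :
    PySem.Str.findFrom seq s (j : Int) none =
      (match pvFindo seq.toList s.toList j with
       | none => (-1 : Int)
       | some a => (a : Int)) := by
  rw [PySem.Str.findFrom_eq]
  have hj' : j ≤ seq.toList.length := by rwa [String.length_toList]
  rw [PySem.Chars.findFrom_natCast seq.toList s.toList j hj']
  unfold pvFindo
  by_cases hr : PySem.Chars.find (seq.toList.drop j) s.toList = -1
  · simp [hr]
  · have h0 : 0 ≤ PySem.Chars.find (seq.toList.drop j) s.toList := by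
      have := PySem.Chars.neg_one_le_find (seq.toList.drop j) s.toList
      omega
    have hcast : ((j + (PySem.Chars.find (seq.toList.drop j) s.toList).toNat : Nat) : Int)
        = (j : Int) + PySem.Chars.find (seq.toList.drop j) s.toList := by
      push_cast [Int.toNat_of_nonneg h0]; ring
    simp only [hr, if_false, hcast]

theorem pvFindFrom0_none (seq s : String) (j : Nat) (hj : j ≤ seq.length)
    (h : pvFindo seq.toList s.toList j = none) :
    PySem.Str.findFrom seq s (j : Int) none = -1 := by
  rw [pvFindFrom0_eq seq s j hj, h]

theorem pvFindFrom0_some (seq s : String) (j a : Nat) (hj : j ≤ seq.length)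
    (h : pvFindo seq.toList s.toList j = some a) :
    PySem.Str.findFrom seq s (j : Int) none = (a : Int) := by
  rw [pvFindFrom0_eq seq s j hj, h]

theorem pvSlice_cond (seq s : String) (j : Nat) :
    (PySem.Str.slice seq (some (j : Int)) (some ((j : Int) + PySem.Str.len s)) = s)
      ↔ s.toList <+: seq.toList.drop j := by
  rw [← String.toList_inj, PySem.Str.toList_slice, PySem.Chars.slice_eq_listSlice]
  rw [show (j : Int) + PySem.Str.len s = ((j : Int) + ((s.toList.length : Nat) : Int)) from rfl]
  rw [PySem.List.slice_natCast_add]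
  rw [List.prefix_iff_eq_take]
  exact ⟨fun h => h.symm, fun h => h.symm⟩

theorem pvReps_eq (seq s : String) :
    ∀ f (j : Nat), pvReps seq s f (j : Int) = ((pvRc seq.toList s.toList f j : Nat) : Int) := by
  intro f
  induction f with
  | zero => intro j; rfl
  | succ f ih =>
    intro j
    simp only [pvReps]
    rw [pvRc_succ]
    have eidx : (j : Int) + PySem.Str.len s = ((j + s.toList.length : Nat) : Int) := by
      show (j : Int) + ((s.toList.length : Nat) : Int) = _
      push_cast; ring
    by_cases hc : s.toList <+: seq.toList.drop j
    · rw [if_pos ((pvSlice_cond seq s j).mpr hc), if_pos hc, eidx, ih (j + s.toList.length)]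
      push_cast; ring
    · rw [if_neg (fun h => hc ((pvSlice_cond seq s j).mp h)), if_neg hc]
      rfl

theorem pvFindall_eq (seq s : String) (hp : s ≠ "") :
    ∀ f (j : Nat), j ≤ seq.length →
      (pvFindall seq s f (j : Int)).map
          (fun m => PySem.Int.floordiv (PySem.Str.len m) (PySem.Str.len s)) =
        List.map (fun (k : Nat) => (k : Int)) (pvRuns seq.toList s.toList f j) := by
  have hp' : s.toList ≠ [] := fun h => hp (String.toList_eq_nil_iff.mp h)
  have hL : 1 ≤ s.toList.length := List.length_pos_iff.mpr hp'
  have hn : seq.length = seq.toList.length := String.length_toList.symm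
  intro f
  induction f with
  | zero => intro j _; rfl
  | succ f ih =>
    intro j hj
    simp only [pvFindall]
    rcases hfo : pvFindo seq.toList s.toList j with - | a
    · rw [pvFindFrom0_none seq s j hj hfo, pvRuns_succ, hfo]
      rw [if_pos rfl]
      rfl
    · obtain ⟨hja, hocc⟩ := pvFindo_some _ _ _ _ hfo
      have haL : a + s.toList.length ≤ seq.toList.length := pvOcc_le _ _ hp' _ hocc
      have hrcocc := pvRc'_occ seq.toList s.toList hp' a hocc
      have hreach : a + pvRc' seq.toList s.toList a * s.toList.length ≤ seq.toList.length :=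
        pvRc'_reach seq.toList s.toList hp' a hocc
      rw [pvFindFrom0_some seq s j a hj hfo, pvRuns_succ, hfo]
      rw [if_neg (show ¬((a:Int) = -1) by omega)]
      have eidx : (a : Int) + PySem.Str.len s = ((a + s.toList.length : Nat) : Int) := by
        show (a : Int) + ((s.toList.length : Nat) : Int) = _
        push_cast; ring
      have ek : pvReps seq s (seq.length + 1) ((a : Int) + PySem.Str.len s) + 1
          = ((pvRc' seq.toList s.toList a : Nat) : Int) := by
        rw [eidx, pvReps_eq seq s (seq.length + 1) (a + s.toList.length), hrcocc]
        rw [show pvRc seq.toList s.toList (seq.length + 1) (a + s.toList.length)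
            = pvRc' seq.toList s.toList (a + s.toList.length) by rw [pvRc']; rw [hn]]
        push_cast; ring
      rw [ek]
      have ee : (a : Int) + ((pvRc' seq.toList s.toList a : Nat) : Int) * PySem.Str.len s
          = ((a + pvRc' seq.toList s.toList a * s.toList.length : Nat) : Int) := by
        show (a : Int) + ((pvRc' seq.toList s.toList a : Nat) : Int) * ((s.toList.length : Nat) : Int) = _
        push_cast; ring
      rw [ee]
      rw [List.map_cons, List.map_cons]
      congr 1
      · -- head: length of the matched slice, divided by len(s)
        have hslice : (PySem.Str.slice seq (some (a : Int))
            (some ((a + pvRc' seq.toList s.toList a * s.toList.length : Nat) : Int))).toList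
            = (seq.toList.drop a).take (pvRc' seq.toList s.toList a * s.toList.length) := by
          rw [PySem.Str.toList_slice, PySem.Chars.slice_eq_listSlice]
          rw [show ((a + pvRc' seq.toList s.toList a * s.toList.length : Nat) : Int)
              = (a : Int) + ((pvRc' seq.toList s.toList a * s.toList.length : Nat) : Int) by push_cast; ring]
          rw [PySem.List.slice_natCast_add]
        have hlen : (PySem.Str.slice seq (some (a : Int))
            (some ((a + pvRc' seq.toList s.toList a * s.toList.length : Nat) : Int))).toList.length
            = pvRc' seq.toList s.toList a * s.toList.length := by
          rw [hslice, List.length_take, List.length_drop]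
          omega
        show PySem.Int.floordiv (PySem.Str.len _) (PySem.Str.len s) = _
        rw [show PySem.Str.len (PySem.Str.slice seq (some (a : Int))
            (some ((a + pvRc' seq.toList s.toList a * s.toList.length : Nat) : Int)))
            = ((pvRc' seq.toList s.toList a * s.toList.length : Nat) : Int) by
          show ((_ : Nat) : Int) = _
          rw [hlen]]
        rw [show PySem.Str.len s = ((s.toList.length : Nat) : Int) from rfl]
        unfold PySem.Int.floordiv
        rw [← Int.ofNat_fdiv, Nat.mul_div_cancel _ (by omega)]
      · exact ih (a + pvRc' seq.toList s.toList a * s.toList.length)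
          (by rw [hn]; exact hreach)

theorem pvMaxq (l : List Nat) :
    (match PySem.List.max? (List.map (fun (k : Nat) => (k : Int)) l) (fun v => v) with
     | none => (0 : Int)
     | some v => v) = ((l.foldr max 0 : Nat) : Int) := by
  have castfold : ∀ (l : List Nat) (x : Nat),
      List.foldl max ((x : Nat) : Int) (List.map (fun (k : Nat) => (k : Int)) l)
        = ((List.foldl max x l : Nat) : Int) := by
    intro l
    induction l with
    | nil => intro x; rfl
    | cons y l ih =>
      intro x
      rw [List.map_cons, List.foldl_cons, List.foldl_cons,
        show max ((x:Nat):Int) ((y:Nat):Int) = ((max x y : Nat) : Int) from (Nat.cast_max x y).symm,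
        ih (max x y)]
  have natfold : ∀ (l : List Nat) (x : Nat), List.foldl max x l = max x (l.foldr max 0) := by
    intro l
    induction l with
    | nil => intro x; simp
    | cons y l ih =>
      intro x
      rw [List.foldl_cons, ih (max x y), List.foldr_cons]
      omega
  cases l with
  | nil => rfl
  | cons x l =>
    rw [List.map_cons, PySem.List.max?_id_cons, castfold l x, natfold l x]
    simp only [List.foldr_cons]

-- ===== VERDICT (by name: the statement is the Claim_ definition above) =====
theorem find_num_of_occurrence_spec : Claim_equal_find_num_of_occurrence := by
  intro seq s _ hpre
  unfold Spec_find_num_of_occurrence find_num_of_occurrence find_num_of_occurrence_alt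
  have hA := pvLoopA_eq seq s hpre (seq.length + 2) 0 0 0 (Nat.zero_le _)
  have hB := pvFindall_eq seq s hpre (seq.length + 1) 0 (Nat.zero_le _)
  have hp : s.toList ≠ [] := fun h => hpre (String.toList_eq_nil_iff.mp h)
  have hn : seq.length = seq.toList.length := String.length_toList.symm
  simp only [Nat.cast_zero] at hA hB
  rw [hA, hn, pvTop seq.toList s.toList hp, pvM, ← hn]
  show _ = (match PySem.List.max? ((pvFindall seq s (seq.length + 1) 0).map
      (fun m => PySem.Int.floordiv (PySem.Str.len m) (PySem.Str.len s))) (fun v => v) with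
    | none => (0:Int) | some v => v)
  rw [hB, pvMaxq]
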